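-- pv_equiv track=rewrite | github.com/ilya04634/BAP | midterm/1400b.py | max_weapons
-- ===== SOURCE A (Python) =====
-- def max_weapons(p, f, cnts, cntw, s, w):
--     if s > w:
--         cnts, cntw, s, w = cntw, cnts, w, s
--
--     max_count = 0
--
--     for swords_taken in range(min(cnts, p // s) + 1):
--         remaining_p = p - swords_taken * s
--         axes_taken = min(cntw, remaining_p // w)
--
--         remaining_swords = cnts - swords_taken
--         remaining_axes = cntw - axes_taken
--
--         swords_taken_f = min(remaining_swords, f // s)
--         remaining_f = f - swords_taken_f * s
--         axes_taken_f = min(remaining_axes, remaining_f // w)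
--
--         total_weapons = swords_taken + axes_taken + swords_taken_f + axes_taken_f
--         max_count = max(max_count, total_weapons)
--
--     return max_count
-- ===== SOURCE B (Python) =====
-- def max_weapons(p, f, cnts, cntw, s, w):
--     if s > w:
--         cnts, cntw, s, w = cntw, cnts, w, s
--
--     def candidate(i):
--         a1 = min(cntw, (p - i * s) // w)
--         j = min(cnts - i, f // s)
--         a2 = min(cntw - a1, (f - j * s) // w)
--         return i + a1 + j + a2
--
--     def best(lo, hi):
--         # maximum of candidate over [lo, hi), by halving (called with lo < hi)
--         if hi - lo <= 1:
--             return candidate(lo)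
--         mid = (lo + hi) // 2
--         return max(best(lo, mid), best(mid, hi))
--
--     n = min(cnts, p // s) + 1
--     return max(0, best(0, n)) if n > 0 else 0
-- ===== Notes on version B (the rewrite author's own statement) =====
-- stated objective: alternative
-- what changed: B replaces A's linear loop with a running maximum by a recursive divide-and-conquer maximisation that splits the candidate range in halves (with an explicit empty-range guard), evaluating the same per-candidate greedy value.
import Mathlib
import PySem

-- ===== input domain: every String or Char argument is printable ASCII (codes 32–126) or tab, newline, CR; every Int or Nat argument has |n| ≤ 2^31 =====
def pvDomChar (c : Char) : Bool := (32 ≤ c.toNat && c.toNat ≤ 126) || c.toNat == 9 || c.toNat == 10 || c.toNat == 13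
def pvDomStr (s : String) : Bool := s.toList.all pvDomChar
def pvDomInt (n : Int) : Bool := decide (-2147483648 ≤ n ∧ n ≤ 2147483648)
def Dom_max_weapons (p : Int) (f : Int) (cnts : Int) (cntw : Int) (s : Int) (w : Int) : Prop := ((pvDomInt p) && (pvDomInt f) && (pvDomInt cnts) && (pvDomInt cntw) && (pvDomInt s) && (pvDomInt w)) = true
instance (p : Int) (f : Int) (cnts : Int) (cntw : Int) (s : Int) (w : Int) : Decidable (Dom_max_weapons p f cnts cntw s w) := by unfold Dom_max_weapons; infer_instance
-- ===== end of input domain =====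

-- B replaces A's linear running-max loop by a divide-and-conquer maximisation over the same candidate range (objective: alternative, same cost).

-- ===== PORT A =====
def max_weapons (p : Int) (f : Int) (cnts : Int) (cntw : Int) (s : Int) (w : Int) : Int :=
  match (if s > w then (cntw, cnts, w, s) else (cnts, cntw, s, w)) with
  | (cnts, cntw, s, w) =>
    (PySem.List.pyRange 0 (min cnts (PySem.Int.floordiv p s) + 1) 1).foldl
      (fun max_count swords_taken =>
        let remaining_p := p - swords_taken * s
        let axes_taken := min cntw (PySem.Int.floordiv remaining_p w)
        let remaining_swords := cnts - swords_taken
        let remaining_axes := cntw - axes_taken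
        let swords_taken_f := min remaining_swords (PySem.Int.floordiv f s)
        let remaining_f := f - swords_taken_f * s
        let axes_taken_f := min remaining_axes (PySem.Int.floordiv remaining_f w)
        max max_count (swords_taken + axes_taken + swords_taken_f + axes_taken_f))
      0

-- ===== PORT B =====
-- B's helper 'candidate(i)' (after the s>w normalisation)
def mwCandidate (p : Int) (f : Int) (cnts : Int) (cntw : Int) (s : Int) (w : Int) (i : Int) : Int :=
  let a1 := min cntw (PySem.Int.floordiv (p - i * s) w)
  let j := min (cnts - i) (PySem.Int.floordiv f s)
  let a2 := min (cntw - a1) (PySem.Int.floordiv (f - j * s) w)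
  i + a1 + j + a2

-- B's helper 'best(lo, hi)': divide-and-conquer maximum of candidate over [lo, hi)
def mwBest (p : Int) (f : Int) (cnts : Int) (cntw : Int) (s : Int) (w : Int) (lo : Int) (hi : Int) : Int :=
  if hi - lo ≤ 1 then mwCandidate p f cnts cntw s w lo
  else
    max (mwBest p f cnts cntw s w lo (PySem.Int.floordiv (lo + hi) 2))
        (mwBest p f cnts cntw s w (PySem.Int.floordiv (lo + hi) 2) hi)
termination_by (hi - lo).toNat
decreasing_by
  all_goals
    rw [PySem.Int.floordiv_eq_ediv_of_pos (by norm_num)]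
    omega

def max_weapons_alt (p : Int) (f : Int) (cnts : Int) (cntw : Int) (s : Int) (w : Int) : Int :=
  match (if s > w then (cntw, cnts, w, s) else (cnts, cntw, s, w)) with
  | (cnts, cntw, s, w) =>
    let n := min cnts (PySem.Int.floordiv p s) + 1
    if n > 0 then max 0 (mwBest p f cnts cntw s w 0 n) else 0

-- ===== PRECONDITION & SPEC =====
-- Pre_ excludes exactly the inputs on which Python's '//' raises ZeroDivisionError (in A and in B alike):
-- min(s,w) = 0, or max(s,w) = 0 while the candidate range is nonempty (an empty range never divides by the larger price).
def Pre_max_weapons (p : Int) (f : Int) (cnts : Int) (cntw : Int) (s : Int) (w : Int) : Prop :=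
  min s w ≠ 0 ∧ (max s w ≠ 0 ∨ min (if s > w then cntw else cnts) (PySem.Int.floordiv p (min s w)) + 1 ≤ 0)
instance (p : Int) (f : Int) (cnts : Int) (cntw : Int) (s : Int) (w : Int) : Decidable (Pre_max_weapons p f cnts cntw s w) := by unfold Pre_max_weapons; infer_instance
def pvWitness_max_weapons : Int × Int × Int × Int × Int × Int := (10, 8, 3, 4, 2, 3)

def Spec_max_weapons (p : Int) (f : Int) (cnts : Int) (cntw : Int) (s : Int) (w : Int) (out : Int) : Prop := out = max_weapons_alt p f cnts cntw s w
instance (p : Int) (f : Int) (cnts : Int) (cntw : Int) (s : Int) (w : Int) (out : Int) : Decidable (Spec_max_weapons p f cnts cntw s w out) := by unfold Spec_max_weapons; infer_instance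

-- ===== CLAIM (what is proved, stated in full; the proofs are below) =====
def Claim_equal_max_weapons : Prop := ∀ (p : Int) (f : Int) (cnts : Int) (cntw : Int) (s : Int) (w : Int), Dom_max_weapons p f cnts cntw s w → Pre_max_weapons p f cnts cntw s w → Spec_max_weapons p f cnts cntw s w (max_weapons p f cnts cntw s w)

-- ===== LEMMAS AND PROOFS =====

-- A's loop body is B's candidate value
theorem mw_body_eq (p f cnts cntw s w acc i : Int) :
    (let remaining_p := p - i * s
     let axes_taken := min cntw (PySem.Int.floordiv remaining_p w)
     let remaining_swords := cnts - i
     let remaining_axes := cntw - axes_taken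
     let swords_taken_f := min remaining_swords (PySem.Int.floordiv f s)
     let remaining_f := f - swords_taken_f * s
     let axes_taken_f := min remaining_axes (PySem.Int.floordiv remaining_f w)
     max acc (i + axes_taken + swords_taken_f + axes_taken_f))
    = max acc (mwCandidate p f cnts cntw s w i) := by
  simp [mwCandidate]

-- the divide-and-conquer maximum equals the running-max fold over the range
theorem mwBest_eq_foldl (p f cnts cntw s w : Int) :
    ∀ (n : Nat) (lo hi : Int), (hi - lo).toNat = n → lo < hi → ∀ acc : Int,
      (PySem.List.pyRange lo hi 1).foldl
        (fun a i => max a (mwCandidate p f cnts cntw s w i)) acc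
      = max acc (mwBest p f cnts cntw s w lo hi) := by
  intro n
  induction n using Nat.strong_induction_on with
  | _ n ih =>
    intro lo hi hn hlt acc
    by_cases hbase : hi - lo ≤ 1
    · have hhi : hi = lo + 1 := by omega
      subst hhi
      rw [PySem.List.pyRange_one_singleton]
      simp [List.foldl, mwBest]
    · have h2 : 2 ≤ hi - lo := by omega
      have hmid : PySem.Int.floordiv (lo + hi) 2 = (lo + hi) / 2 :=
        PySem.Int.floordiv_eq_ediv_of_pos (by norm_num)
      conv_rhs => rw [mwBest]
      rw [if_neg hbase]
      generalize hmeq : PySem.Int.floordiv (lo + hi) 2 = mid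
      rw [hmeq] at hmid
      have hlom : lo < mid := by omega
      have hmhi : mid < hi := by omega
      rw [PySem.List.pyRange_one_append lo mid hi (le_of_lt hlom) (le_of_lt hmhi),
          List.foldl_append,
          ih (mid - lo).toNat (by omega) lo mid rfl hlom acc,
          ih (hi - mid).toNat (by omega) mid hi rfl hmhi _,
          max_assoc]

-- A and B agree for the (already-normalised) parameters
theorem mw_core_eq (p f cnts cntw s w : Int) :
    (PySem.List.pyRange 0 (min cnts (PySem.Int.floordiv p s) + 1) 1).foldl
      (fun max_count swords_taken =>
        let remaining_p := p - swords_taken * s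
        let axes_taken := min cntw (PySem.Int.floordiv remaining_p w)
        let remaining_swords := cnts - swords_taken
        let remaining_axes := cntw - axes_taken
        let swords_taken_f := min remaining_swords (PySem.Int.floordiv f s)
        let remaining_f := f - swords_taken_f * s
        let axes_taken_f := min remaining_axes (PySem.Int.floordiv remaining_f w)
        max max_count (swords_taken + axes_taken + swords_taken_f + axes_taken_f))
      0
    = (let n := min cnts (PySem.Int.floordiv p s) + 1
       if n > 0 then max 0 (mwBest p f cnts cntw s w 0 n) else 0) := by
  have hfun :
      (fun (max_count swords_taken : Int) =>
        let remaining_p := p - swords_taken * s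
        let axes_taken := min cntw (PySem.Int.floordiv remaining_p w)
        let remaining_swords := cnts - swords_taken
        let remaining_axes := cntw - axes_taken
        let swords_taken_f := min remaining_swords (PySem.Int.floordiv f s)
        let remaining_f := f - swords_taken_f * s
        let axes_taken_f := min remaining_axes (PySem.Int.floordiv remaining_f w)
        max max_count (swords_taken + axes_taken + swords_taken_f + axes_taken_f))
      = fun a i => max a (mwCandidate p f cnts cntw s w i) := by
    funext a i
    exact mw_body_eq p f cnts cntw s w a i
  rw [hfun]
  set n := min cnts (PySem.Int.floordiv p s) + 1 with hn
  by_cases hpos : n > 0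
  · rw [if_pos hpos]
    exact mwBest_eq_foldl p f cnts cntw s w (n - 0).toNat 0 n rfl (by omega) 0
  · rw [if_neg hpos]
    rw [PySem.List.pyRange_one_eq_nil (by omega)]
    rfl

-- ===== VERDICT (by name: the statement is the Claim_ definition above) =====
theorem max_weapons_spec : Claim_equal_max_weapons := by
  intro p f cnts cntw s w _ _
  unfold Spec_max_weapons max_weapons max_weapons_alt
  by_cases hsw : s > w
  · rw [if_pos hsw]
    exact mw_core_eq p f cntw cnts w s
  · rw [if_neg hsw]
    exact mw_core_eq p f cnts cntw s w
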